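-- pv_equiv track=rewrite | github.com/va64doman/codility | Challenges/omicron2012.py | powerFib
-- ===== SOURCE A (Python) =====
-- MOD = 10000103
--
-- T = 20000208
--
-- def mul(x, y, M):
--     return x * y % M
--     pass
--
-- def add(x, y, M):
--     x += y
--     return x if x < M else x - M
--     pass
--
-- def mulmatrix(a, b):
--     c = [0] * 2
--     for i in range(2):
--         c[i] = [0] * 2
--     for i in range(2):
--         for j in range(2):
--             c[i][j] = 0
--             for k in range(2):
--                 c[i][j] = add(c[i][j], mul(a[i][k], b[k][j], MOD), MOD)
--     return c
--     pass
--
-- def make(a, b):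
--     for i in range(2):
--         for j in range(2):
--             a[i][j] = b[i][j]
--     pass
--
-- def powerFib(N, M):
--     p = 1
--     x = N
--     while M:
--         if M & 1:
--             p = mul(p,x,T)
--         x = mul(x,x,T)
--         M >>= 1
--     p -= 1
--     if p == 0:
--         return 0
--     a = [0] * 2
--     b = [0] * 2
--     for i in range(2):
--         a[i] = [0] * 2
--         b[i] = [0] * 2
--     a[0][0] = a[1][1] = b[0][1] = b[1][0] = b[1][1] = 1
--     while p:
--         if p & 1:
--             c = mulmatrix(a,b)
--             make(a,c)
--         c = mulmatrix(b,b)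
--         make(b,c)
--         p >>= 1
--     return a[1][1]
--     pass
-- ===== SOURCE B (Python) =====
-- MOD = 10000103
--
-- T = 20000208
--
--
-- def _powmod(x, m):
--     # x**m mod T by recursive halving
--     if m == 0:
--         return 1
--     h = _powmod(x, m // 2)
--     h = h * h % T
--     return h * x % T if m & 1 else h
--
--
-- def _fib(k):
--     # (F(k) mod MOD, F(k+1) mod MOD) by fast doubling
--     if k == 0:
--         return (0, 1)
--     a, b = _fib(k >> 1)
--     c = a * (2 * b - a) % MOD
--     d = (a * a + b * b) % MOD
--     return (d, (c + d) % MOD) if k & 1 else (c, d)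
--
--
-- def powerFib(N, M):
--     p = _powmod(N, M) - 1
--     if p == 0:
--         return 0
--     return _fib(p)[1]
-- ===== Notes on version B (the rewrite author's own statement) =====
-- stated objective: simpler
-- what changed: The 2x2 matrix exponentiation (mulmatrix/make with the add/mul helpers) is replaced by scalar fast-doubling Fibonacci, and the N^M mod T loop by a recursive halving powmod; same O(log N^M mod T) cost with far less code and no matrix bookkeeping.
import Mathlib
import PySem

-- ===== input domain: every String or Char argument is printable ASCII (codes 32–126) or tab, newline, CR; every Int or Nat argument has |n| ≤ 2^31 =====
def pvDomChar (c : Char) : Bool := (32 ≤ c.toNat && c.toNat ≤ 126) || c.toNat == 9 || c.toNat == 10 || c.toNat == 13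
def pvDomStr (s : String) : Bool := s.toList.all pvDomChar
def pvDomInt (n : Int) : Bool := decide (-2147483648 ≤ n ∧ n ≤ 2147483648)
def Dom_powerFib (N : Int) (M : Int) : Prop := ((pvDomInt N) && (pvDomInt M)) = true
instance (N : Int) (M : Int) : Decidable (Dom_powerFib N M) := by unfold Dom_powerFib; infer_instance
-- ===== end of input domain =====

-- B replaces A's 2x2 matrix exponentiation by scalar fast-doubling Fibonacci (and the
-- bit-loop powmod by a recursive halving powmod): same result, plainer code.


-- ===== PORT A =====
def MOD : Int := 10000103
def T : Int := 20000208

def mulA (x y m : Int) : Int := PySem.Int.mod (x * y) m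

def addA (x y m : Int) : Int := let x := x + y; if x < m then x else x - m

-- a 2x2 matrix [[a00,a01],[a10,a11]] is (a00, a01, a10, a11)
abbrev M2 := Int × Int × Int × Int

def mulmatrixA (a b : M2) : M2 :=
  ( addA (addA 0 (mulA a.1 b.1 MOD) MOD) (mulA a.2.1 b.2.2.1 MOD) MOD
  , addA (addA 0 (mulA a.1 b.2.1 MOD) MOD) (mulA a.2.1 b.2.2.2 MOD) MOD
  , addA (addA 0 (mulA a.2.2.1 b.1 MOD) MOD) (mulA a.2.2.2 b.2.2.1 MOD) MOD
  , addA (addA 0 (mulA a.2.2.1 b.2.1 MOD) MOD) (mulA a.2.2.2 b.2.2.2 MOD) MOD )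

-- the `while M:` binary-exponentiation loop of A
def bexpA (p x : Int) (m : Nat) : Int :=
  if _h : m = 0 then p
  else bexpA (if m % 2 = 1 then mulA p x T else p) (mulA x x T) (m / 2)
termination_by m
decreasing_by omega

-- the `while p:` matrix-exponentiation loop of A (make(a,c) is the functional update)
def mexpA (a b : M2) (q : Nat) : M2 :=
  if _h : q = 0 then a
  else mexpA (if q % 2 = 1 then mulmatrixA a b else a) (mulmatrixA b b) (q / 2)
termination_by q
decreasing_by omega

-- Python A diverges when M < 0 or when N^M % T == 0; on those inputs the port's
-- Int.toNat conversions make it total (and the two ports still agree there).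
def powerFib (N : Int) (M : Int) : Int :=
  let p := bexpA 1 N M.toNat
  let p := p - 1
  if p = 0 then 0
  else
    let a : M2 := (1, 0, 0, 1)
    let b : M2 := (0, 1, 1, 1)
    (mexpA a b p.toNat).2.2.2

-- ===== PORT B =====
def bpow (x : Int) (m : Nat) : Int :=
  if _h : m = 0 then 1
  else
    let h0 := bpow x (m / 2)
    let h1 := PySem.Int.mod (h0 * h0) T
    if m % 2 = 1 then PySem.Int.mod (h1 * x) T else h1
termination_by m
decreasing_by omega

def bfib (k : Nat) : Int × Int :=
  if _h : k = 0 then (0, 1)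
  else
    let ab := bfib (k / 2)
    let a := ab.1
    let b := ab.2
    let c := PySem.Int.mod (a * (2 * b - a)) MOD
    let d := PySem.Int.mod (a * a + b * b) MOD
    if k % 2 = 1 then (d, PySem.Int.mod (c + d) MOD) else (c, d)
termination_by k
decreasing_by omega

def powerFib_alt (N : Int) (M : Int) : Int :=
  let p := bpow N M.toNat - 1
  if p = 0 then 0
  else (bfib p.toNat).2

-- ===== PRECONDITION & SPEC =====
def Spec_powerFib (N : Int) (M : Int) (out : Int) : Prop := out = powerFib_alt N M
instance (N : Int) (M : Int) (out : Int) : Decidable (Spec_powerFib N M out) := by unfold Spec_powerFib; infer_instance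

-- ===== CLAIM (what is proved, stated in full; the proofs are below) =====
def Claim_equal_powerFib : Prop := ∀ (N : Int) (M : Int), Dom_powerFib N M → Spec_powerFib N M (powerFib N M)

-- ===== LEMMAS AND PROOFS =====

theorem hMOD : (0 : Int) < MOD := by decide
theorem hT : (0 : Int) < T := by decide
theorem modM (x : Int) : PySem.Int.mod x MOD = x % MOD := PySem.Int.mod_eq_emod_of_pos hMOD
theorem modT (x : Int) : PySem.Int.mod x T = x % T := PySem.Int.mod_eq_emod_of_pos hT
theorem modeq_self (n x : Int) : x % n ≡ x [ZMOD n] := Int.emod_emod_of_dvd x dvd_rfl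

-- ---- the two powmods compute N^M % T ----

theorem bexpA_eq (m : Nat) : ∀ p x : Int, 0 ≤ p → p < T → bexpA p x m = (p * x ^ m) % T := by
  induction m using Nat.strong_induction_on with
  | _ m ih =>
    intro p x hp0 hp1
    rw [bexpA]
    by_cases hm : m = 0
    · simp only [hm, dif_pos, pow_zero, mul_one]
      exact (Int.emod_eq_of_lt hp0 hp1).symm
    · rw [dif_neg hm]
      have hq0 : 0 ≤ (if m % 2 = 1 then mulA p x T else p) := by
        split_ifs
        · exact PySem.Int.mod_nonneg _ hT
        · exact hp0
      have hq1 : (if m % 2 = 1 then mulA p x T else p) < T := by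
        split_ifs
        · exact PySem.Int.mod_lt _ hT
        · exact hp1
      rw [ih (m / 2) (by omega) _ _ hq0 hq1]
      simp only [mulA, modT]
      by_cases hodd : m % 2 = 1
      · rw [if_pos hodd]
        have hmeq : m = 2 * (m / 2) + 1 := by omega
        calc ((p * x) % T * ((x * x) % T) ^ (m / 2)) % T
            = ((p * x) * (x * x) ^ (m / 2)) % T :=
              Int.ModEq.mul (modeq_self T _) ((modeq_self T _).pow _)
          _ = (p * x ^ m) % T := by
              congr 1
              rw [← pow_two, ← pow_mul]
              conv_rhs => rw [hmeq]
              ring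
      · rw [if_neg hodd]
        have hmeq : m = 2 * (m / 2) := by omega
        calc (p * ((x * x) % T) ^ (m / 2)) % T
            = (p * (x * x) ^ (m / 2)) % T :=
              Int.ModEq.mul (Int.ModEq.refl p) ((modeq_self T _).pow _)
          _ = (p * x ^ m) % T := by
              congr 1
              rw [← pow_two, ← pow_mul, ← hmeq]

theorem bpow_eq (m : Nat) : ∀ x : Int, bpow x m = x ^ m % T := by
  induction m using Nat.strong_induction_on with
  | _ m ih =>
    intro x
    rw [bpow]
    by_cases hm : m = 0
    · simp only [hm, dif_pos, pow_zero]
      decide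
    · rw [dif_neg hm]
      simp only [ih (m / 2) (by omega), modT]
      have hsq : (x ^ (m / 2) % T) * (x ^ (m / 2) % T) % T = x ^ (2 * (m / 2)) % T := by
        calc (x ^ (m / 2) % T) * (x ^ (m / 2) % T) % T
            = (x ^ (m / 2) * x ^ (m / 2)) % T := Int.ModEq.mul (modeq_self T _) (modeq_self T _)
          _ = x ^ (2 * (m / 2)) % T := by rw [two_mul, pow_add]
      by_cases hodd : m % 2 = 1
      · rw [if_pos hodd, hsq]
        have hmeq : m = 2 * (m / 2) + 1 := by omega
        calc (x ^ (2 * (m / 2)) % T) * x % T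
            = (x ^ (2 * (m / 2)) * x) % T := Int.ModEq.mul (modeq_self T _) (Int.ModEq.refl x)
          _ = x ^ m % T := by rw [← pow_succ, ← hmeq]
      · rw [if_neg hodd, hsq]
        have hmeq : m = 2 * (m / 2) := by omega
        rw [← hmeq]

-- ---- the matrix phase of A computes fib (k+1) % MOD ----

-- exact (unreduced) 2x2 matrix product and entrywise reduction mod MOD
def nmul (a b : M2) : M2 :=
  ( a.1 * b.1 + a.2.1 * b.2.2.1
  , a.1 * b.2.1 + a.2.1 * b.2.2.2
  , a.2.2.1 * b.1 + a.2.2.2 * b.2.2.1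
  , a.2.2.1 * b.2.1 + a.2.2.2 * b.2.2.2 )

def mmod (a : M2) : M2 := (a.1 % MOD, a.2.1 % MOD, a.2.2.1 % MOD, a.2.2.2 % MOD)

def npow (b : M2) : Nat → M2
  | 0 => (1, 0, 0, 1)
  | n + 1 => nmul (npow b n) b

theorem npow_zero' (b : M2) : npow b 0 = (1, 0, 0, 1) := rfl

theorem npow_succ' (b : M2) (n : Nat) : npow b (n + 1) = nmul (npow b n) b := rfl

theorem nmul_assoc (a b c : M2) : nmul (nmul a b) c = nmul a (nmul b c) := by
  simp only [nmul, Prod.mk.injEq]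
  refine ⟨by ring, by ring, by ring, by ring⟩

theorem nmul_one_left (a : M2) : nmul (1, 0, 0, 1) a = a := by
  simp [nmul]

theorem nmul_one_right (a : M2) : nmul a (1, 0, 0, 1) = a := by
  simp [nmul]

theorem npow_succ_left (b : M2) (n : Nat) : npow b (n + 1) = nmul b (npow b n) := by
  induction n with
  | zero => rw [npow_succ', npow_zero', nmul_one_left, nmul_one_right]
  | succ n ih => rw [npow_succ' b (n + 1), ih, nmul_assoc, ← npow_succ' b n, ih]

theorem npow_two_mul (b : M2) (k : Nat) : npow b (2 * k) = npow (nmul b b) k := by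
  induction k with
  | zero => rfl
  | succ k ih =>
    have h : 2 * (k + 1) = 2 * k + 1 + 1 := by ring
    rw [h, npow_succ', npow_succ', ih, npow_succ', nmul_assoc]

-- one entry of mulmatrix: add(add(0, mul(x,·)), mul(y,·)) computes (x + y) % MOD
theorem entry_eq (x y : Int) :
    addA (addA 0 (PySem.Int.mod x MOD) MOD) (PySem.Int.mod y MOD) MOD = (x + y) % MOD := by
  rw [modM, modM]
  have hx0 : 0 ≤ x % MOD := Int.emod_nonneg _ hMOD.ne'
  have hx1 : x % MOD < MOD := Int.emod_lt_of_pos _ hMOD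
  have hy0 : 0 ≤ y % MOD := Int.emod_nonneg _ hMOD.ne'
  have hy1 : y % MOD < MOD := Int.emod_lt_of_pos _ hMOD
  simp only [addA, MOD] at *
  split_ifs <;> omega

theorem mulmatrixA_eq (a b : M2) : mulmatrixA a b = mmod (nmul a b) := by
  simp only [mulmatrixA, mulA, nmul, mmod, entry_eq]

theorem mmod_nmul_mmod (a b : M2) : mmod (nmul (mmod a) (mmod b)) = mmod (nmul a b) := by
  have key : ∀ x y u v : Int,
      (x % MOD * (u % MOD) + y % MOD * (v % MOD)) % MOD = (x * u + y * v) % MOD := fun x y u v =>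
    Int.ModEq.add ((modeq_self MOD x).mul (modeq_self MOD u))
      ((modeq_self MOD y).mul (modeq_self MOD v))
  simp only [mmod, nmul, key]

theorem mexpA_eq (q : Nat) : ∀ a b : M2, mexpA (mmod a) (mmod b) q = mmod (nmul a (npow b q)) := by
  induction q using Nat.strong_induction_on with
  | _ q ih =>
    intro a b
    rw [mexpA]
    by_cases hq : q = 0
    · simp [hq, npow_zero', nmul_one_right]
    · rw [dif_neg hq]
      have hb : mulmatrixA (mmod b) (mmod b) = mmod (nmul b b) := by
        rw [mulmatrixA_eq, mmod_nmul_mmod]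
      have ha : (if q % 2 = 1 then mulmatrixA (mmod a) (mmod b) else mmod a)
          = mmod (if q % 2 = 1 then nmul a b else a) := by
        split_ifs
        · rw [mulmatrixA_eq, mmod_nmul_mmod]
        · rfl
      rw [ha, hb, ih (q / 2) (by omega), ← npow_two_mul]
      by_cases hodd : q % 2 = 1
      · have h2 : 2 * (q / 2) + 1 = q := by omega
        rw [if_pos hodd, nmul_assoc, ← npow_succ_left, h2]
      · have h2 : 2 * (q / 2) = q := by omega
        rw [if_neg hodd, h2]

-- npow of the Fibonacci matrix
theorem npow_fib (n : Nat) :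
    npow (0, 1, 1, 1) n
      = ((Nat.fib (n + 1) : Int) - Nat.fib n, (Nat.fib n : Int), (Nat.fib n : Int), (Nat.fib (n + 1) : Int)) := by
  induction n with
  | zero => simp [npow_zero']
  | succ n ih =>
    rw [npow_succ', ih]
    have h2 : Nat.fib (n + 1 + 1) = Nat.fib n + Nat.fib (n + 1) := Nat.fib_add_two
    simp only [nmul, Prod.mk.injEq]
    refine ⟨?_, ?_, ?_, ?_⟩ <;> (push_cast [h2]; ring)

-- A's matrix phase returns fib (k+1) % MOD
theorem mexpA_fib (k : Nat) :
    (mexpA (1, 0, 0, 1) (0, 1, 1, 1) k).2.2.2 = (Nat.fib (k + 1) : Int) % MOD := by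
  have h1 : ((1, 0, 0, 1) : M2) = mmod (1, 0, 0, 1) := by decide
  have h2 : ((0, 1, 1, 1) : M2) = mmod (0, 1, 1, 1) := by decide
  rw [h1, h2, mexpA_eq, nmul_one_left, npow_fib]
  rfl

-- ---- B's fast doubling returns (fib k % MOD, fib (k+1) % MOD) ----

theorem bfib_eq (k : Nat) :
    bfib k = ((Nat.fib k : Int) % MOD, (Nat.fib (k + 1) : Int) % MOD) := by
  induction k using Nat.strong_induction_on with
  | _ k ih =>
    rw [bfib]
    by_cases hk : k = 0
    · rw [dif_pos hk, hk]
      decide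
    · rw [dif_neg hk, ih (k / 2) (by omega)]
      dsimp only
      simp only [modM]
      set m := k / 2 with hm
      set x := (Nat.fib m : Int) with hx
      set y := (Nat.fib (m + 1) : Int) with hy
      have h1 : Nat.fib m ≤ Nat.fib (m + 1) := Nat.fib_mono (Nat.le_succ m)
      have hle : Nat.fib m ≤ 2 * Nat.fib (m + 1) := by omega
      have hc : (x % MOD * (2 * (y % MOD) - x % MOD)) % MOD = (Nat.fib (2 * m) : Int) % MOD := by
        calc (x % MOD * (2 * (y % MOD) - x % MOD)) % MOD
            = (x * (2 * y - x)) % MOD :=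
              Int.ModEq.mul (modeq_self MOD x)
                (Int.ModEq.sub ((Int.ModEq.refl 2).mul (modeq_self MOD y)) (modeq_self MOD x))
          _ = (Nat.fib (2 * m) : Int) % MOD := by
              congr 1
              rw [Nat.fib_two_mul, hx, hy]
              push_cast [hle]
              ring
      have hd : (x % MOD * (x % MOD) + y % MOD * (y % MOD)) % MOD
          = (Nat.fib (2 * m + 1) : Int) % MOD := by
        calc (x % MOD * (x % MOD) + y % MOD * (y % MOD)) % MOD
            = (x * x + y * y) % MOD :=
              Int.ModEq.add ((modeq_self MOD x).mul (modeq_self MOD x))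
                ((modeq_self MOD y).mul (modeq_self MOD y))
          _ = (Nat.fib (2 * m + 1) : Int) % MOD := by
              congr 1
              rw [Nat.fib_two_mul_add_one, hx, hy]
              push_cast
              ring
      by_cases hodd : k % 2 = 1
      · have hkeq : k = 2 * m + 1 := by omega
        rw [if_pos hodd, hkeq, hc, hd]
        have hcd : ((Nat.fib (2 * m) : Int) % MOD + (Nat.fib (2 * m + 1) : Int) % MOD) % MOD
            = (Nat.fib (2 * m + 1 + 1) : Int) % MOD := by
          calc ((Nat.fib (2 * m) : Int) % MOD + (Nat.fib (2 * m + 1) : Int) % MOD) % MOD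
              = ((Nat.fib (2 * m) : Int) + (Nat.fib (2 * m + 1) : Int)) % MOD :=
                Int.ModEq.add (modeq_self MOD _) (modeq_self MOD _)
            _ = (Nat.fib (2 * m + 1 + 1) : Int) % MOD := by
                congr 1
                rw [show Nat.fib (2 * m + 1 + 1) = Nat.fib (2 * m) + Nat.fib (2 * m + 1) from Nat.fib_add_two]
                push_cast
                ring
        rw [hcd]
      · have hkeq : k = 2 * m := by omega
        rw [if_neg hodd, hkeq, hc, hd]

-- ---- assembly ----

theorem main_eq (N M : Int) : powerFib N M = powerFib_alt N M := by
  simp only [powerFib, powerFib_alt]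
  have hpp : bexpA 1 N M.toNat = bpow N M.toNat := by
    rw [bexpA_eq _ 1 N (by decide) (by decide), one_mul, bpow_eq]
  rw [hpp]
  by_cases hq : bpow N M.toNat - 1 = 0
  · rw [if_pos hq, if_pos hq]
  · rw [if_neg hq, if_neg hq, mexpA_fib, bfib_eq]

-- ===== VERDICT (by name: the statement is the Claim_ definition above) =====
theorem powerFib_spec : Claim_equal_powerFib := by
  intro N M _
  exact main_eq N M
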